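-- pv_equiv track=rewrite | github.com/kercmari/open-ai-context | src/domain/services/utils.py | empy_open_close
-- ===== SOURCE A (Python) =====
-- def empy_open_close(texto):
--     aperturas_vacias = []
--     cierres_vacios = []
--     stack = []
--
--     for i, char in enumerate(texto):
--         if char in '{[':
--             stack.append((char, i))
--         elif char in '}]':
--             if stack:
--                 apertura, apertura_index = stack.pop()
--                 if apertura == '{' and char == '}':
--                     if apertura_index + 1 == i:
--                         cierres_vacios.append((apertura_index, i))
--                 elif apertura == '[' and char == ']':
--                     if apertura_index + 1 == i:
--                         aperturas_vacias.append((apertura_index, i))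
--             else:
--                 pass
--
--     return aperturas_vacias, cierres_vacios
-- ===== SOURCE B (Python) =====
-- def empy_open_close(texto):
--     pares = list(zip(texto, texto[1:]))
--     aperturas_vacias = [(i, i + 1) for i, (a, b) in enumerate(pares) if a == '[' and b == ']']
--     cierres_vacios = [(i, i + 1) for i, (a, b) in enumerate(pares) if a == '{' and b == '}']
--     return aperturas_vacias, cierres_vacios
-- ===== Notes on version B (the rewrite author's own statement) =====
-- stated objective: simpler
-- what changed: Replaced the stack-based bracket matcher with a stackless sliding-window scan: the original only ever records adjacent matching pairs, so B just collects every position whose two-character window is an empty bracket pair or an empty brace pair.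
import Mathlib
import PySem

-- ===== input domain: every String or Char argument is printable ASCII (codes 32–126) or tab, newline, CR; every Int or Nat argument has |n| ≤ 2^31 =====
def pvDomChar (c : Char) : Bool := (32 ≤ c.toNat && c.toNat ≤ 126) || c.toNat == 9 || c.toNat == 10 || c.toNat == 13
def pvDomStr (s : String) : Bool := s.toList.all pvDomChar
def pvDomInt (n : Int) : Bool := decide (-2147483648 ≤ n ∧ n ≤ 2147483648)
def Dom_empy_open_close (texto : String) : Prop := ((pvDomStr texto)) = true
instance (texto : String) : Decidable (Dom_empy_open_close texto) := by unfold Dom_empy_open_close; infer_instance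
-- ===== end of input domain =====

-- B replaces A's stack-based matcher by a stackless adjacent-window scan (simpler; same cost).


-- ===== PORT A =====
-- A's loop over enumerate(texto), carrying the two result lists and the stack.
def pvLoopA : List Char → Int → List (Int × Int) → List (Int × Int) →
    List (Char × Int) → (List (Int × Int)) × (List (Int × Int))
  | [], _, ap, ci, _ => (ap, ci)
  | ch :: rest, i, ap, ci, stack =>
    if ch = '{' ∨ ch = '[' then
      pvLoopA rest (i + 1) ap ci ((ch, i) :: stack)
    else if ch = '}' ∨ ch = ']' then
      match stack with
      | [] => pvLoopA rest (i + 1) ap ci []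
      | (ao, aj) :: st =>
        if ao = '{' ∧ ch = '}' then
          pvLoopA rest (i + 1) ap (if aj + 1 = i then ci ++ [(aj, i)] else ci) st
        else if ao = '[' ∧ ch = ']' then
          pvLoopA rest (i + 1) (if aj + 1 = i then ap ++ [(aj, i)] else ap) ci st
        else
          pvLoopA rest (i + 1) ap ci st
    else
      pvLoopA rest (i + 1) ap ci stack

def empy_open_close (texto : String) : (List (Int × Int)) × (List (Int × Int)) :=
  pvLoopA texto.toList 0 [] [] []

-- ===== PORT B =====
-- B's comprehensions over enumerate(zip(texto, texto[1:])): adjacent two-character windows.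
def pvWinOpen : List Char → Int → List (Int × Int)
  | a :: b :: rest, i =>
    (if a = '[' ∧ b = ']' then [(i, i + 1)] else []) ++ pvWinOpen (b :: rest) (i + 1)
  | _, _ => []

def pvWinClose : List Char → Int → List (Int × Int)
  | a :: b :: rest, i =>
    (if a = '{' ∧ b = '}' then [(i, i + 1)] else []) ++ pvWinClose (b :: rest) (i + 1)
  | _, _ => []

def empy_open_close_alt (texto : String) : (List (Int × Int)) × (List (Int × Int)) :=
  (pvWinOpen texto.toList 0, pvWinClose texto.toList 0)

-- ===== PRECONDITION & SPEC =====
def Spec_empy_open_close (texto : String) (out : (List (Int × Int)) × (List (Int × Int))) : Prop := out = empy_open_close_alt texto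
instance (texto : String) (out : (List (Int × Int)) × (List (Int × Int))) : Decidable (Spec_empy_open_close texto out) := by unfold Spec_empy_open_close; infer_instance

-- ===== CLAIM (what is proved, stated in full; the proofs are below) =====
def Claim_equal_empy_open_close : Prop := ∀ (texto : String), Dom_empy_open_close texto → Spec_empy_open_close texto (empy_open_close texto)

-- ===== LEMMAS AND PROOFS =====

-- Main invariant: if every stack entry's index is at most i-2 ("fresh" stack), the loop
-- appends exactly the adjacent windows of the remaining text; and clause (b) handles a
-- stack whose top was pushed at the immediately preceding position by an opener.
theorem pvLoopA_windows :
    ∀ (cs : List Char) (i : Int) (ap ci : List (Int × Int)) (stack : List (Char × Int)),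
      (∀ p ∈ stack, p.2 + 1 < i) →
      (pvLoopA cs i ap ci stack = (ap ++ pvWinOpen cs i, ci ++ pvWinClose cs i)
       ∧ ∀ c, (c = '{' ∨ c = '[') →
          pvLoopA cs i ap ci ((c, i - 1) :: stack)
            = (ap ++ pvWinOpen (c :: cs) (i - 1), ci ++ pvWinClose (c :: cs) (i - 1))) := by
  intro cs
  induction cs with
  | nil =>
    intro i ap ci stack _
    refine ⟨by simp [pvLoopA, pvWinOpen, pvWinClose], ?_⟩
    intro c hc
    rcases hc with hc | hc <;> simp [pvLoopA, pvWinOpen, pvWinClose, hc]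
  | cons x cs' ih =>
    intro i ap ci stack hfresh
    have hfresh' : ∀ p ∈ stack, p.2 + 1 < i + 1 := fun p hp => by
      have := hfresh p hp; omega
    constructor
    · -- (a) fresh stack
      by_cases hop : x = '{' ∨ x = '['
      · -- opener: use clause (b) of the IH at index i+1 with stack unchanged
        have hb := (ih (i + 1) ap ci stack hfresh').2 x hop
        simp only [add_sub_cancel_right] at hb
        simpa [pvLoopA, hop] using hb
      · by_cases hcl : x = '}' ∨ x = ']'
        · -- closer against a fresh (or empty) stack: never records
          have hwo : pvWinOpen (x :: cs') i = pvWinOpen cs' (i + 1) := by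
            cases cs' with
            | nil => simp [pvWinOpen]
            | cons b r =>
              have : ¬ (x = '[' ∧ b = ']') := by
                rintro ⟨h, -⟩; exact hop (Or.inr h)
              simp [pvWinOpen, this]
          have hwc : pvWinClose (x :: cs') i = pvWinClose cs' (i + 1) := by
            cases cs' with
            | nil => simp [pvWinClose]
            | cons b r =>
              have : ¬ (x = '{' ∧ b = '}') := by
                rintro ⟨h, -⟩; exact hop (Or.inl h)
              simp [pvWinClose, this]
          rcases hcl with rfl | rfl <;>
          · cases stack with
            | nil =>
              have ha := (ih (i + 1) ap ci [] (by simp)).1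
              simp [pvLoopA, ha, hwo, hwc]
            | cons top st =>
              obtain ⟨ao, aj⟩ := top
              have hajlt : aj + 1 < i := hfresh (ao, aj) (by simp)
              have hne : ¬ aj + 1 = i := by omega
              have hst : ∀ p ∈ st, p.2 + 1 < i + 1 := fun p hp =>
                hfresh' p (List.mem_cons_of_mem _ hp)
              have ha := (ih (i + 1) ap ci st hst).1
              by_cases h1 : ao = '{'
              · simp [pvLoopA, h1, hne, ha, hwo, hwc]
              · by_cases h2 : ao = '['
                · simp [pvLoopA, h1, h2, hne, ha, hwo, hwc]
                · simp [pvLoopA, h1, h2, ha, hwo, hwc]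
        · -- ordinary character
          have hwo : pvWinOpen (x :: cs') i = pvWinOpen cs' (i + 1) := by
            cases cs' with
            | nil => simp [pvWinOpen]
            | cons b r =>
              have : ¬ (x = '[' ∧ b = ']') := by
                rintro ⟨h, -⟩; exact hop (Or.inr h)
              simp [pvWinOpen, this]
          have hwc : pvWinClose (x :: cs') i = pvWinClose cs' (i + 1) := by
            cases cs' with
            | nil => simp [pvWinClose]
            | cons b r =>
              have : ¬ (x = '{' ∧ b = '}') := by
                rintro ⟨h, -⟩; exact hop (Or.inl h)
              simp [pvWinClose, this]
          have ha := (ih (i + 1) ap ci stack hfresh').1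
          simp [pvLoopA, hop, hcl, ha, hwo, hwc]
    · -- (b) stack topped by an opener pushed at position i-1
      intro c hc
      have htriv : i - 1 + 1 = i := by omega
      by_cases hop : x = '{' ∨ x = '['
      · -- two openers in a row: window (c,x) never matches
        have hcx1 : ¬ (c = '[' ∧ x = ']') := by
          rintro ⟨-, h⟩; rcases hop with h' | h' <;> simp [h'] at h
        have hcx2 : ¬ (c = '{' ∧ x = '}') := by
          rintro ⟨-, h⟩; rcases hop with h' | h' <;> simp [h'] at h
        have hrest : ∀ p ∈ (c, i - 1) :: stack, p.2 + 1 < i + 1 := by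
          intro p hp
          rcases List.mem_cons.mp hp with h | h
          · subst h; change i - 1 + 1 < i + 1; omega
          · have := hfresh p h; omega
        have hb := (ih (i + 1) ap ci ((c, i - 1) :: stack) hrest).2 x hop
        simp only [add_sub_cancel_right] at hb
        simp only [pvLoopA, hop, if_pos]
        rw [hb]
        simp [pvWinOpen, pvWinClose, hcx1, hcx2, htriv]
      · by_cases hcl : x = '}' ∨ x = ']'
        · -- closer: pops (c, i-1); records exactly when the window (c,x) matches
          have hacl := fun ap' ci' => (ih (i + 1) ap' ci' stack hfresh').1
          have hwo' : pvWinOpen (x :: cs') i = pvWinOpen cs' (i + 1) := by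
            cases cs' with
            | nil => simp [pvWinOpen]
            | cons b r =>
              have : ¬ (x = '[' ∧ b = ']') := by
                rintro ⟨h, -⟩; exact hop (Or.inr h)
              simp [pvWinOpen, this]
          have hwc' : pvWinClose (x :: cs') i = pvWinClose cs' (i + 1) := by
            cases cs' with
            | nil => simp [pvWinClose]
            | cons b r =>
              have : ¬ (x = '{' ∧ b = '}') := by
                rintro ⟨h, -⟩; exact hop (Or.inl h)
              simp [pvWinClose, this]
          rcases hcl with rfl | rfl <;> rcases hc with rfl | rfl <;>
            simp [pvLoopA, htriv, hacl, pvWinOpen, pvWinClose, hwo', hwc']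
        · -- ordinary character: top becomes fresh for i+1
          have hrest : ∀ p ∈ (c, i - 1) :: stack, p.2 + 1 < i + 1 := by
            intro p hp
            rcases List.mem_cons.mp hp with h | h
            · subst h; change i - 1 + 1 < i + 1; omega
            · have := hfresh p h; omega
          have ha := (ih (i + 1) ap ci ((c, i - 1) :: stack) hrest).1
          have hcx1 : ¬ (c = '[' ∧ x = ']') := by
            rintro ⟨-, h⟩; exact hcl (Or.inr h)
          have hcx2 : ¬ (c = '{' ∧ x = '}') := by
            rintro ⟨-, h⟩; exact hcl (Or.inl h)
          have hwo' : pvWinOpen (x :: cs') i = pvWinOpen cs' (i + 1) := by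
            cases cs' with
            | nil => simp [pvWinOpen]
            | cons b r =>
              have : ¬ (x = '[' ∧ b = ']') := by
                rintro ⟨h, -⟩; exact hop (Or.inr h)
              simp [pvWinOpen, this]
          have hwc' : pvWinClose (x :: cs') i = pvWinClose cs' (i + 1) := by
            cases cs' with
            | nil => simp [pvWinClose]
            | cons b r =>
              have : ¬ (x = '{' ∧ b = '}') := by
                rintro ⟨h, -⟩; exact hop (Or.inl h)
              simp [pvWinClose, this]
          simp [pvLoopA, hop, hcl, ha, pvWinOpen, pvWinClose, hcx1, hcx2, htriv, hwo', hwc']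

-- ===== VERDICT (by name: the statement is the Claim_ definition above) =====
theorem empy_open_close_spec : Claim_equal_empy_open_close := by
  intro texto _
  unfold Spec_empy_open_close empy_open_close empy_open_close_alt
  have h := (pvLoopA_windows texto.toList 0 [] [] [] (by simp)).1
  simpa using h
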